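-- pv_equiv track=rewrite | github.com/Lighteros/Astrofolio-AI-bot | script2.py | determine_aspect_and_strength
-- ===== SOURCE A (Python) =====
-- ASPECTS = {
--     'conjunct': (0, 10),
--     'sextile': (60, 10),
--     'square': (90, 10),
--     'trine': (120, 10),
--     'opposite': (180, 10)
-- }
--
-- def determine_aspect_and_strength(angle):
--     for aspect, (exact_angle, max_deviation) in ASPECTS.items():
--         deviation = abs(angle - exact_angle)
--         if deviation <= max_deviation:
--             if deviation <= 3:
--                 strength_description = "strong"
--             elif deviation <= 7:
--                 strength_description = "moderate"
--             else:
--                 strength_description = "weak"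
--             return aspect, strength_description
--     return None, None
-- ===== SOURCE B (Python) =====
-- ASPECTS = {
--     'conjunct': (0, 10),
--     'sextile': (60, 10),
--     'square': (90, 10),
--     'trine': (120, 10),
--     'opposite': (180, 10)
-- }
--
-- def determine_aspect_and_strength(angle):
--     # one pass: find the aspect with minimum absolute deviation, then validate & classify
--     best_aspect, best_dev, best_max = None, None, None
--     for aspect, (exact_angle, max_deviation) in ASPECTS.items():
--         dev = abs(angle - exact_angle)
--         if best_dev is None or dev < best_dev:
--             best_aspect, best_dev, best_max = aspect, dev, max_deviation
--     if best_dev > best_max: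
--         return None, None
--     if best_dev <= 3:
--         strength = "strong"
--     elif best_dev <= 7:
--         strength = "moderate"
--     else:
--         strength = "weak"
--     return best_aspect, strength
-- ===== Notes on version B (the rewrite author's own statement) =====
-- stated objective: alternative
-- what changed: B finds the aspect of minimum absolute deviation in one pass (running-minimum state, no early return) and only afterwards validates against that aspect's orb and classifies strength, instead of early-returning on the first in-orb aspect; equal because the aspects' orb windows never overlap.
import Mathlib
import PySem

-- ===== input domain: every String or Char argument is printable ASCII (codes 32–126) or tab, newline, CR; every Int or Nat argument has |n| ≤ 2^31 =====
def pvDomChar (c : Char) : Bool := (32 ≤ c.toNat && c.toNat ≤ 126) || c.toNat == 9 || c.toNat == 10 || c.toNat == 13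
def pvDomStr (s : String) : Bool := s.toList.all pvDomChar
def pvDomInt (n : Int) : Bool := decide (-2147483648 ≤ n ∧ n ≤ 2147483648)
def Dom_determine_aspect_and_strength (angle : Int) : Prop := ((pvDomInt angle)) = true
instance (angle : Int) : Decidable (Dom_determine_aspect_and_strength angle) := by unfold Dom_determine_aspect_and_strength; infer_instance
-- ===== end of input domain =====

-- B finds the minimum-deviation aspect in one pass, then validates against the orb and classifies;
-- equal to A's first-in-orb scan because the orb windows never overlap (alternative decomposition, same cost).


-- ===== PORT A =====
-- Python abs on Int
def pyabs (x : Int) : Int := if x < 0 then -x else x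

-- ASPECTS dict as an association list in insertion order
def ASPECTS : List (String × Int × Int) :=
  [("conjunct", 0, 10), ("sextile", 60, 10), ("square", 90, 10), ("trine", 120, 10), ("opposite", 180, 10)]

-- A's loop: early return on the first aspect within its orb
def goA (angle : Int) : List (String × Int × Int) → Option String × Option String
  | [] => (none, none)
  | (aspect, exact_angle, max_deviation) :: rest =>
    let deviation := pyabs (angle - exact_angle)
    if deviation ≤ max_deviation then
      (some aspect,
       some (if deviation ≤ 3 then "strong" else if deviation ≤ 7 then "moderate" else "weak"))
    else goA angle rest

def determine_aspect_and_strength (angle : Int) : Option String × Option String :=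
  goA angle ASPECTS

-- ===== PORT B =====
-- B: one pass tracking the running minimum deviation; validate and classify afterwards
def determine_aspect_and_strength_alt (angle : Int) : Option String × Option String :=
  let best := ASPECTS.foldl
    (fun (st : Option (String × Int × Int)) (p : String × Int × Int) =>
      let dev := pyabs (angle - p.2.1)
      match st with
      | none => some (p.1, dev, p.2.2)
      | some (a, bd, bm) => if dev < bd then some (p.1, dev, p.2.2) else some (a, bd, bm))
    none
  match best with
  | none => (none, none)
  | some (a, bd, bm) =>
    if bm < bd then (none, none)
    else (some a, some (if bd ≤ 3 then "strong" else if bd ≤ 7 then "moderate" else "weak"))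

-- ===== PRECONDITION & SPEC =====
def Spec_determine_aspect_and_strength (angle : Int) (out : Option String × Option String) : Prop := out = determine_aspect_and_strength_alt angle
instance (angle : Int) (out : Option String × Option String) : Decidable (Spec_determine_aspect_and_strength angle out) := by unfold Spec_determine_aspect_and_strength; infer_instance

-- ===== CLAIM (what is proved, stated in full; the proofs are below) =====
def Claim_equal_determine_aspect_and_strength : Prop := ∀ (angle : Int), Dom_determine_aspect_and_strength angle → Spec_determine_aspect_and_strength angle (determine_aspect_and_strength angle)

-- ===== LEMMAS AND PROOFS =====

-- ===== VERDICT (by name: the statement is the Claim_ definition above) =====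
set_option maxHeartbeats 2000000 in
theorem determine_aspect_and_strength_spec : Claim_equal_determine_aspect_and_strength := by
  intro angle _
  unfold Spec_determine_aspect_and_strength determine_aspect_and_strength
    determine_aspect_and_strength_alt ASPECTS goA pyabs
  simp only [List.foldl]
  split_ifs <;> try first | rfl | omega
  all_goals ((try simp only [goA, pyabs]); (try dsimp only); (split_ifs <;> try first | rfl | omega))
  all_goals ((try dsimp only); (split_ifs <;> try first | rfl | omega))
  all_goals ((try dsimp only); (split_ifs <;> try first | rfl | omega))
  all_goals ((try dsimp only); split_ifs <;> first | rfl | omega)
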